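-- pv_equiv track=rewrite | github.com/wucong75644-crypto/EVERYDAYAIONE | backend/services/kuaimai/param_guardrails.py | _match_items
-- ===== SOURCE A (Python) =====
-- from typing import Any, Dict, List, Optional, Tuple
--
-- _CODE_MATCH_FIELDS = ("outerId", "skuOuterId", "mainOuterId")
--
-- def _match_items(
--     items: List[Dict[str, Any]],
--     original_code: str,
-- ) -> List[Dict[str, Any]]:
--     """从宽泛查询结果中匹配原始编码
--
--     策略：先精确匹配，无精确匹配时再 contains 匹配。
--     大小写不敏感。
--     """
--     needle = original_code.upper()
--
--     # 先精确匹配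
--     exact = []
--     for item in items:
--         for field in _CODE_MATCH_FIELDS:
--             val = str(item.get(field, "")).upper()
--             if val == needle:
--                 exact.append(item)
--                 break
--     if exact:
--         return exact
--
--     # 再 contains 匹配（双向：needle in val 或 val in needle）
--     contains = []
--     for item in items:
--         for field in _CODE_MATCH_FIELDS:
--             val = str(item.get(field, "")).upper()
--             if val and (needle in val or val in needle):
--                 contains.append(item)
--                 break
--     return contains
-- ===== SOURCE B (Python) =====
-- from typing import Any, Dict, List
--
-- _CODE_MATCH_FIELDS = ("outerId", "skuOuterId", "mainOuterId")
--
-- def _match_items(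
--     items: List[Dict[str, Any]],
--     original_code: str,
-- ) -> List[Dict[str, Any]]:
--     """Single coordinated pass: classify each item as exact and/or contains once,
--     uppercasing each field value only once, then decide at the end."""
--     needle = original_code.upper()
--     exact = []
--     contains = []
--     for item in items:
--         vals = [str(item.get(f, "")).upper() for f in _CODE_MATCH_FIELDS]
--         if any(v == needle for v in vals):
--             exact.append(item)
--         if any(v and (needle in v or v in needle) for v in vals):
--             contains.append(item)
--     return exact or contains
-- ===== Notes on version B (the rewrite author's own statement) =====
-- stated objective: alternative
-- what changed: Replaced A's two sequential scans over items (exact pass, then a separate contains pass) by a single coordinated pass that classifies each item into the exact and contains lists at once, uppercasing each field value only once per item, with the exact-vs-contains decision made after the loop.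
import Mathlib
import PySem

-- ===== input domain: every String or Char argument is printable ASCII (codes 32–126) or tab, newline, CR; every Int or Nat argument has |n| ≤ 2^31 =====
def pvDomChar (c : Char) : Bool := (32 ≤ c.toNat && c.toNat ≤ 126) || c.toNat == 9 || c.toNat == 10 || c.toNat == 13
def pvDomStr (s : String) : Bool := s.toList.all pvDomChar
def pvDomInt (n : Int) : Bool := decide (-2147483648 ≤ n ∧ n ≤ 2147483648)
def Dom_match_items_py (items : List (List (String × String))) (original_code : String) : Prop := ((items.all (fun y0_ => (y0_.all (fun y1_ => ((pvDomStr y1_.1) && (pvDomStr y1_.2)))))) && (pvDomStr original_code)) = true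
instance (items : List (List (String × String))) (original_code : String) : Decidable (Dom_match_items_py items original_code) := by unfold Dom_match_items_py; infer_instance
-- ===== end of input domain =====

-- B replaces A's two sequential scans by one coordinated pass that classifies each
-- item as exact and/or contains at once (uppercasing each field value only once);
-- objective: alternative decomposition, same asymptotic cost.

-- ===== PORT A =====
def pvFields : List String := ["outerId", "skuOuterId", "mainOuterId"]

-- item.get(field, "") on the association list (first match, Python dict semantics)
def pvGetField (item : List (String × String)) (field : String) : String :=
  (PySem.Dict.mk item).getD field ""

def match_items_py (items : List (List (String × String))) (original_code : String) : List (List (String × String)) :=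
  let needle := PySem.Str.upper original_code
  -- first scan: exact matches (the inner for/break = first field that matches appends once)
  let exact := items.foldl (fun acc item =>
    if pvFields.any (fun field => PySem.Str.upper (pvGetField item field) == needle)
    then acc ++ [item] else acc) []
  if exact = [] then
    -- second scan: contains matches (bidirectional, non-empty value only)
    items.foldl (fun acc item =>
      if pvFields.any (fun field =>
        let val := PySem.Str.upper (pvGetField item field)
        !(val == "") && (PySem.Str.isIn needle val || PySem.Str.isIn val needle))
      then acc ++ [item] else acc) []
  else exact

-- ===== PORT B =====
def match_items_py_alt (items : List (List (String × String))) (original_code : String) : List (List (String × String)) :=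
  let needle := PySem.Str.upper original_code
  let p := items.foldl (fun (p : List (List (String × String)) × List (List (String × String))) item =>
    let vals := pvFields.map (fun f => PySem.Str.upper (pvGetField item f))
    ((if vals.any (fun v => v == needle) then p.1 ++ [item] else p.1),
     (if vals.any (fun v => !(v == "") && (PySem.Str.isIn needle v || PySem.Str.isIn v needle))
      then p.2 ++ [item] else p.2))) ([], [])
  if p.1 = [] then p.2 else p.1

-- ===== PRECONDITION & SPEC =====
def Spec_match_items_py (items : List (List (String × String))) (original_code : String) (out : List (List (String × String))) : Prop := out = match_items_py_alt items original_code
instance (items : List (List (String × String))) (original_code : String) (out : List (List (String × String))) : Decidable (Spec_match_items_py items original_code out) := by unfold Spec_match_items_py; infer_instance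

-- ===== CLAIM (what is proved, stated in full; the proofs are below) =====
def Claim_equal_match_items_py : Prop := ∀ (items : List (List (String × String))) (original_code : String), Dom_match_items_py items original_code → Spec_match_items_py items original_code (match_items_py items original_code)

-- ===== LEMMAS AND PROOFS =====

-- B's paired fold splits into the two independent folds A performs.
theorem pv_pair_fold {β : Type} (e c : β → Bool) (items : List β)
    (a b : List β) :
    items.foldl (fun (p : List β × List β) item =>
      ((if e item then p.1 ++ [item] else p.1),
       (if c item then p.2 ++ [item] else p.2))) (a, b)
    = (items.foldl (fun acc item => if e item then acc ++ [item] else acc) a,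
       items.foldl (fun acc item => if c item then acc ++ [item] else acc) b) := by
  induction items generalizing a b with
  | nil => rfl
  | cons x xs ih => simp only [List.foldl_cons]; exact ih _ _

-- ===== VERDICT (by name: the statement is the Claim_ definition above) =====
theorem match_items_py_spec : Claim_equal_match_items_py := by
  intro items original_code _
  unfold Spec_match_items_py match_items_py match_items_py_alt
  simp only [List.any_map, Function.comp_def]
  rw [pv_pair_fold]
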